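-- pv_equiv track=rewrite | github.com/Alfayoumi/LoRaWAN-Network-Manager | kpi_calculation/dependencies/utility_functions.py | get_region_freq_plan
-- ===== SOURCE A (Python) =====
-- from typing import List
--
-- def get_region_freq_plan(freq: str) -> List[str]:
--     region_freq_plan = {
--         "EU": [
--             "868100000",
--             "868300000",
--             "868500000",
--             "867100000",
--             "867300000",
--             "867500000",
--             "867700000",
--             "867900000",
--         ],
--         "US": [
--             "902300000",
--             "902500000",
--             "902700000",
--             "902900000",
--             "903100000",
--             "903300000",
--             "903500000",
--             "903700000",
--             "903900000",
--             "904100000",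
--             "904300000",
--             "904500000",
--             "904700000",
--             "904900000",
--             "905100000",
--             "905300000",
--         ],
--         "AU": [
--             "915200000",
--             "915400000",
--             "915600000",
--             "915800000",
--             "916000000",
--             "916200000",
--             "916400000",
--             "916600000",
--             "916800000",
--             "917000000",
--             "917200000",
--             "917400000",
--             "917600000",
--             "917800000",
--             "918000000",
--             "918200000",
--         ],
--         # Add other regions if needed
--     }
--
--     for region, freq_list in region_freq_plan.items():
--         if freq in freq_list:
--             return freq_list
--
--     # If the frequency is not in any region, return an empty list
--     return []
-- ===== SOURCE B (Python) =====
-- from typing import List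
--
-- def get_region_freq_plan(freq: str) -> List[str]:
--     # Each region is a list of (sub-band base, channel count); channels are 200 kHz apart.
--     STEP = 200000
--     REGION_BANDS = [
--         [(868100000, 3), (867100000, 5)],   # EU
--         [(902300000, 16)],                  # US
--         [(915200000, 16)],                  # AU
--     ]
--     try:
--         n = int(freq)
--     except ValueError:
--         return []
--     if str(n) != freq:
--         return []
--     for bands in REGION_BANDS:
--         if any(b <= n <= b + STEP * (c - 1) and (n - b) % STEP == 0 for b, c in bands):
--             return [str(b + STEP * i) for b, c in bands for i in range(c)]
--     return []
-- ===== Notes on version B (the rewrite author's own statement) =====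
-- stated objective: alternative
-- what changed: B replaces A's hard-coded 40-entry table scan by arithmetic: it parses the frequency as an integer, checks membership in each region's (base, count, 200 kHz step) sub-bands by a range-and-divisibility test, and regenerates the region's channel list from the closed form str(base + 200000*i).
import Mathlib
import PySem

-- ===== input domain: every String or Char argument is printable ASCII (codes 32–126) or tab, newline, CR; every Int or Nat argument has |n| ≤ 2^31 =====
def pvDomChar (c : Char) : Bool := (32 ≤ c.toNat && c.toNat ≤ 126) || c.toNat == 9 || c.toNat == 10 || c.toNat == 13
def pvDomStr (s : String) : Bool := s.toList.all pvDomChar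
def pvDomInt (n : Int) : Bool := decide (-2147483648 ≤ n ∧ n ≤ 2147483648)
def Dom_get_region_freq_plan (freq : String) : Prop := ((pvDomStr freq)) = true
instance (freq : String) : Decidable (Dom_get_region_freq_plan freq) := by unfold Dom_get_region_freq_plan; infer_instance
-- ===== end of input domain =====

-- B replaces A's hard-coded 40-entry table scan by arithmetic: parse the frequency as an
-- integer, test each region's (base, count) sub-bands by range + 200 kHz divisibility, and
-- regenerate the region's channel list from the closed form (objective: alternative).

-- ===== PORT A =====
-- literal frequency lists from A's region dict
def pvEU : List String :=
  ["868100000", "868300000", "868500000", "867100000", "867300000", "867500000", "867700000", "867900000"]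
def pvUS : List String :=
  ["902300000", "902500000", "902700000", "902900000", "903100000", "903300000", "903500000", "903700000",
   "903900000", "904100000", "904300000", "904500000", "904700000", "904900000", "905100000", "905300000"]
def pvAU : List String :=
  ["915200000", "915400000", "915600000", "915800000", "916000000", "916200000", "916400000", "916600000",
   "916800000", "917000000", "917200000", "917400000", "917600000", "917800000", "918000000", "918200000"]

def pvRegionDictA : PySem.Dict String (List String) :=
  PySem.Dict.ofList [("EU", pvEU), ("US", pvUS), ("AU", pvAU)]

-- 'for region, freq_list in …items(): if freq in freq_list: return freq_list'
def pvFindLoop (freq : String) : List (String × List String) → List String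
  | [] => []
  | (_, fl) :: rest => if freq ∈ fl then fl else pvFindLoop freq rest

def get_region_freq_plan (freq : String) : List String :=
  pvFindLoop freq pvRegionDictA.items

-- ===== PORT B =====
-- REGION_BANDS: each region as a list of (sub-band base, channel count); STEP = 200000
def pvBands : List (List (Int × Int)) :=
  [[(868100000, 3), (867100000, 5)], [(902300000, 16)], [(915200000, 16)]]

-- 'b <= n <= b + STEP*(c-1) and (n - b) % STEP == 0'
def pvHit (n : Int) (bc : Int × Int) : Bool :=
  decide (bc.1 ≤ n) && decide (n ≤ bc.1 + 200000 * (bc.2 - 1)) && (PySem.Int.mod (n - bc.1) 200000 == 0)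

-- '[str(b + STEP * i) for b, c in bands for i in range(c)]'
def pvGen (bands : List (Int × Int)) : List String :=
  bands.flatMap (fun bc => (PySem.List.pyRange 0 bc.2 1).map (fun i => PySem.Int.toStr (bc.1 + 200000 * i)))

-- 'for bands in REGION_BANDS: if any(…): return […]'
def pvLoopB (n : Int) : List (List (Int × Int)) → List String
  | [] => []
  | bands :: rest => if bands.any (pvHit n) then pvGen bands else pvLoopB n rest

def get_region_freq_plan_alt (freq : String) : List String :=
  match PySem.Int.ofStr? freq with
  | none => []                      -- except ValueError: return []
  | some n =>
      if PySem.Int.toStr n ≠ freq then []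
      else pvLoopB n pvBands

-- ===== PRECONDITION & SPEC =====
def Spec_get_region_freq_plan (freq : String) (out : List String) : Prop := out = get_region_freq_plan_alt freq
instance (freq : String) (out : List String) : Decidable (Spec_get_region_freq_plan freq out) := by unfold Spec_get_region_freq_plan; infer_instance

-- ===== CLAIM =====
def Claim_equal_get_region_freq_plan : Prop := ∀ (freq : String), Dom_get_region_freq_plan freq → Spec_get_region_freq_plan freq (get_region_freq_plan freq)

-- ===== LEMMAS AND PROOFS =====

-- on every frequency present in some plan, the two ports agree (finite check)
set_option maxRecDepth 40000 in
set_option maxHeartbeats 2000000 in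
lemma pv_hit_all : ∀ f ∈ pvEU ++ pvUS ++ pvAU,
    get_region_freq_plan f = get_region_freq_plan_alt f := by decide

-- a band hit means n is exactly base + 200000*k for some 0 ≤ k < count
lemma pv_band (b c n : Int) (h : pvHit n (b, c) = true) :
    ∃ k, 0 ≤ k ∧ k < c ∧ n = b + 200000 * k := by
  simp only [pvHit, Bool.and_eq_true, beq_iff_eq, decide_eq_true_eq] at h
  obtain ⟨⟨h1, h2⟩, h3⟩ := h
  obtain ⟨k, hk⟩ := (PySem.Int.mod_eq_zero_iff_dvd _ _).mp h3
  exact ⟨k, by omega, by omega, by omega⟩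

lemma pv_memEU (n : Int)
    (h : pvHit n (868100000, 3) = true ∨ pvHit n (867100000, 5) = true) :
    PySem.Int.toStr n ∈ pvEU := by
  rcases h with h | h <;> obtain ⟨k, h0, h1, rfl⟩ := pv_band _ _ _ h <;>
    interval_cases k <;> decide

lemma pv_memUS (n : Int) (h : pvHit n (902300000, 16) = true) :
    PySem.Int.toStr n ∈ pvUS := by
  obtain ⟨k, h0, h1, rfl⟩ := pv_band _ _ _ h
  interval_cases k <;> decide

lemma pv_memAU (n : Int) (h : pvHit n (915200000, 16) = true) :
    PySem.Int.toStr n ∈ pvAU := by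
  obtain ⟨k, h0, h1, rfl⟩ := pv_band _ _ _ h
  interval_cases k <;> decide

lemma pv_itemsA : pvRegionDictA.items = [("EU", pvEU), ("US", pvUS), ("AU", pvAU)] := by decide

-- ===== VERDICT =====
theorem get_region_freq_plan_spec : Claim_equal_get_region_freq_plan := by
  intro freq _
  unfold Spec_get_region_freq_plan
  by_cases hmem : freq ∈ pvEU ++ pvUS ++ pvAU
  · exact pv_hit_all freq hmem
  · simp only [List.mem_append, not_or] at hmem
    obtain ⟨⟨h1, h2⟩, h3⟩ := hmem
    have hA : get_region_freq_plan freq = [] := by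
      rw [get_region_freq_plan, pv_itemsA]
      simp [pvFindLoop, h1, h2, h3]
    rw [hA, get_region_freq_plan_alt]
    cases hstr : PySem.Int.ofStr? freq with
    | none => rfl
    | some n =>
      simp only []
      by_cases heq : PySem.Int.toStr n = freq
      · have hEU : ([((868100000:Int), (3:Int)), (867100000, 5)].any (pvHit n)) = false := by
          by_contra hc
          have := pv_memEU n (by
            simpa [List.any, Bool.or_eq_true] using (Bool.not_eq_false _).mp hc)
          rw [heq] at this; exact h1 this
        have hUS : ([((902300000:Int), (16:Int))].any (pvHit n)) = false := by
          by_contra hc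
          have := pv_memUS n (by simpa [List.any] using (Bool.not_eq_false _).mp hc)
          rw [heq] at this; exact h2 this
        have hAU : ([((915200000:Int), (16:Int))].any (pvHit n)) = false := by
          by_contra hc
          have := pv_memAU n (by simpa [List.any] using (Bool.not_eq_false _).mp hc)
          rw [heq] at this; exact h3 this
        simp [heq, pvBands, pvLoopB, hEU, hUS, hAU]
      · simp [heq]
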